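-- pv_equiv track=rewrite | github.com/aki274415919/foritgate_policy | fortigate.py | get_all_service_members
-- ===== SOURCE A (Python) =====
-- def get_all_service_members(name, svc_groups, svc_lookup, _visited=None):
--     if _visited is None:
--         _visited = set()
--     name_key = name.strip().lower()
--     if name_key in _visited:
--         return set()
--     _visited.add(name_key)
--     if name_key in svc_lookup:
--         real_name = svc_lookup[name_key]
--         group = svc_groups.get(real_name)
--         if group:
--             all_members = set()
--             for member in group.get('members', []):
--                 all_members |= get_all_service_members(member, svc_groups, svc_lookup, _visited)
--             return all_members
--     return {name.strip()}
-- ===== SOURCE B (Python) =====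
-- def get_all_service_members(name, svc_groups, svc_lookup, _visited=None):
--     # Iterative DFS with an explicit stack instead of recursion; same return value.
--     if _visited is None:
--         _visited = set()
--     result = set()
--     stack = [name]
--     while stack:
--         node = stack.pop()
--         key = node.strip().lower()
--         if key in _visited:
--             continue
--         _visited.add(key)
--         group = None
--         if key in svc_lookup:
--             group = svc_groups.get(svc_lookup[key])
--         if group:
--             stack.extend(reversed(group.get('members', [])))
--         else:
--             result.add(node.strip())
--     return result
-- ===== Notes on version B (the rewrite author's own statement) =====
-- stated objective: alternative
-- what changed: Replaces the recursive set-union traversal by an iterative depth-first search with an explicit stack and a single accumulated result set (members pushed in reverse so pop order matches the recursive pre-order).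
import Mathlib
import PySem

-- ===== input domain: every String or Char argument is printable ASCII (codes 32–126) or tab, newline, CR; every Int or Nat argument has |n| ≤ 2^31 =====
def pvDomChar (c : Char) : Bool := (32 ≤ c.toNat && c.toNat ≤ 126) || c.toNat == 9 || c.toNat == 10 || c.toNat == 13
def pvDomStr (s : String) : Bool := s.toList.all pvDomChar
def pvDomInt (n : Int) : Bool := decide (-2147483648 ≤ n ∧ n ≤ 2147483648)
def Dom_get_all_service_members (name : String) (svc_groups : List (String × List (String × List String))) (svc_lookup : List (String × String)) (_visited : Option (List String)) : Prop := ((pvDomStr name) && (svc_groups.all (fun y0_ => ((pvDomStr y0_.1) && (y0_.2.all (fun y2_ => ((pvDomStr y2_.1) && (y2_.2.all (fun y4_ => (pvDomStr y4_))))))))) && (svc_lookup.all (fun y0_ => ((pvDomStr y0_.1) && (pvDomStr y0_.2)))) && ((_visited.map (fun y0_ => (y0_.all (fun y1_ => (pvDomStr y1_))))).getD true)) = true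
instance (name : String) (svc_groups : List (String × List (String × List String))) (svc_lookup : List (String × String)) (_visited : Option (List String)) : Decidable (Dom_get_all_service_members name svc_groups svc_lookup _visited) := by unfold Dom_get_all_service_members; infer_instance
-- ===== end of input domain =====

-- B re-implements the recursive group expansion as an iterative stack-based DFS; the equivalence
-- proved here is about the RETURN value only (both Pythons also mutate the passed-in _visited set,
-- and they do so identically, but that side effect is not part of the claim).
-- Both ports carry a fuel counter (one unit per processed node) purely as a totality guard; the
-- shared bound pvFuel is always sufficient, and the equivalence is proved for every fuel value.

-- ===== PORT A =====

-- totality guard shared by both ports: an upper bound on the number of nodes either traversal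
-- can process ((total member count + 2)^2 ≥ 1 + (#distinct keys) * (max members per expansion))
def pvFuel (svc_groups : List (String × List (String × List String))) : Nat :=
  let n := (svc_groups.map (fun g => (g.2.map (fun kv => kv.2.length)).sum)).sum
  (n + 2) * (n + 2)

mutual
-- recursive traversal of A; returns (result set, visited set, leftover fuel)
def pvAgo (fuel : Nat) (name : String) (svc_groups : List (String × List (String × List String))) (svc_lookup : List (String × String)) (v : PySem.Set String) :
    PySem.Set String × PySem.Set String × Nat :=
  match fuel with
  | 0 => (PySem.Set.empty, v, 0)
  | f + 1 =>
    let key := PySem.Str.lower (PySem.Str.strip name)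
    if PySem.Set.contains v key then (PySem.Set.empty, v, f)
    else
      let v1 := PySem.Set.add v key
      match (PySem.Dict.mk svc_lookup).get? key with
      | some real_name =>
        match (PySem.Dict.mk svc_groups).get? real_name with
        | some group =>
          if group ≠ [] then
            pvAgoList f ((PySem.Dict.mk group).getD "members" []) svc_groups svc_lookup v1 PySem.Set.empty
          else ([PySem.Str.strip name], v1, f)
        | none => ([PySem.Str.strip name], v1, f)
      | none => ([PySem.Str.strip name], v1, f)
termination_by (fuel, 0)
decreasing_by
  all_goals rw [Prod.lex_iff]
  all_goals simp

-- the 'for member in group.get('members', [])' loop of A, accumulating all_members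
def pvAgoList (fuel : Nat) (members : List String) (svc_groups : List (String × List (String × List String))) (svc_lookup : List (String × String)) (v : PySem.Set String) (acc : PySem.Set String) :
    PySem.Set String × PySem.Set String × Nat :=
  match members with
  | [] => (acc, v, fuel)
  | m :: rest =>
    let r := pvAgo fuel m svc_groups svc_lookup v
    -- 'min r.2.2 fuel' is a totality guard only: leftover fuel never exceeds the input fuel
    pvAgoList (min r.2.2 fuel) rest svc_groups svc_lookup r.2.1 (PySem.Set.union acc r.1)
termination_by (fuel, members.length + 1)
decreasing_by
  all_goals rw [Prod.lex_iff]
  all_goals simp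
  all_goals omega
end

def get_all_service_members (name : String) (svc_groups : List (String × List (String × List String))) (svc_lookup : List (String × String)) (_visited : Option (List String)) : List String :=
  let v := match _visited with
    | none => PySem.Set.empty
    | some l => PySem.Set.ofList l
  (pvAgo (pvFuel svc_groups) name svc_groups svc_lookup v).1

-- ===== PORT B =====

-- the while-loop of B; Python's end-of-list stack with 'stack.extend(reversed(members))' and
-- 'stack.pop()' is modelled as a head-of-list stack pushing 'members' in order (exact: the
-- double reversal cancels, pop order is identical)
def pvBloop (fuel : Nat) (stack : List String) (svc_groups : List (String × List (String × List String))) (svc_lookup : List (String × String)) (v result : PySem.Set String) : PySem.Set String :=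
  match fuel, stack with
  | 0, _ => result
  | _ + 1, [] => result
  | f + 1, node :: rest =>
    let key := PySem.Str.lower (PySem.Str.strip node)
    if PySem.Set.contains v key then pvBloop f rest svc_groups svc_lookup v result
    else
      let v1 := PySem.Set.add v key
      let group : Option (List (String × List String)) :=
        match (PySem.Dict.mk svc_lookup).get? key with
        | some rn => (PySem.Dict.mk svc_groups).get? rn
        | none => none
      match group with
      | some g =>
        if g ≠ [] then
          pvBloop f ((PySem.Dict.mk g).getD "members" [] ++ rest) svc_groups svc_lookup v1 result
        else pvBloop f rest svc_groups svc_lookup v1 (PySem.Set.add result (PySem.Str.strip node))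
      | none => pvBloop f rest svc_groups svc_lookup v1 (PySem.Set.add result (PySem.Str.strip node))

def get_all_service_members_alt (name : String) (svc_groups : List (String × List (String × List String))) (svc_lookup : List (String × String)) (_visited : Option (List String)) : List String :=
  let v := match _visited with
    | none => PySem.Set.empty
    | some l => PySem.Set.ofList l
  pvBloop (pvFuel svc_groups) [name] svc_groups svc_lookup v PySem.Set.empty

-- ===== PRECONDITION & SPEC =====
def Spec_get_all_service_members (name : String) (svc_groups : List (String × List (String × List String))) (svc_lookup : List (String × String)) (_visited : Option (List String)) (out : List String) : Prop := out = get_all_service_members_alt name svc_groups svc_lookup _visited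
instance (name : String) (svc_groups : List (String × List (String × List String))) (svc_lookup : List (String × String)) (_visited : Option (List String)) (out : List String) : Decidable (Spec_get_all_service_members name svc_groups svc_lookup _visited out) := by unfold Spec_get_all_service_members; infer_instance

-- ===== CLAIM (what is proved, stated in full; the proofs are below) =====
def Claim_equal_get_all_service_members : Prop := ∀ (name : String) (svc_groups : List (String × List (String × List String))) (svc_lookup : List (String × String)) (_visited : Option (List String)), Dom_get_all_service_members name svc_groups svc_lookup _visited → Spec_get_all_service_members name svc_groups svc_lookup _visited (get_all_service_members name svc_groups svc_lookup _visited)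

-- ===== LEMMAS AND PROOFS =====

theorem pv_update_single {s : PySem.Set String} {a : String} :
    PySem.Set.update s [a] = PySem.Set.add s a := rfl

theorem pv_update_add (s t : PySem.Set String) (a : String) :
    PySem.Set.update s (PySem.Set.add t a) = PySem.Set.add (PySem.Set.update s t) a := by
  by_cases h : a ∈ t
  · rw [PySem.Set.add_of_mem h, PySem.Set.add_of_mem (by rw [PySem.Set.mem_update]; exact Or.inr h)]
  · rw [PySem.Set.add_of_not_mem h, PySem.Set.update_append, pv_update_single]

theorem pv_update_assoc (s t : PySem.Set String) (l : List String) :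
    PySem.Set.update s (PySem.Set.update t l) = PySem.Set.update (PySem.Set.update s t) l := by
  induction l generalizing t with
  | nil => rfl
  | cons a l ih =>
    rw [PySem.Set.update_cons, ih, pv_update_add, PySem.Set.update_cons]

theorem pvAgoList_fuel_le (fuel : Nat) (members : List String) (svc_groups : List (String × List (String × List String))) (svc_lookup : List (String × String)) (v acc : PySem.Set String) :
    (pvAgoList fuel members svc_groups svc_lookup v acc).2.2 ≤ fuel := by
  match members with
  | [] => simp only [pvAgoList]; exact Nat.le_refl fuel
  | m :: rest =>
    simp only [pvAgoList]
    exact le_trans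
      (pvAgoList_fuel_le (min (pvAgo fuel m svc_groups svc_lookup v).2.2 fuel) rest svc_groups svc_lookup _ _)
      (Nat.min_le_right _ _)
termination_by (fuel, members.length + 1)
decreasing_by
  all_goals rw [Prod.lex_iff]
  all_goals simp
  all_goals omega

theorem pvAgo_fuel_le (fuel : Nat) (name : String) (svc_groups : List (String × List (String × List String))) (svc_lookup : List (String × String)) (v : PySem.Set String) :
    (pvAgo fuel name svc_groups svc_lookup v).2.2 ≤ fuel := by
  match fuel with
  | 0 => simp only [pvAgo]; exact Nat.le_refl 0
  | f + 1 =>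
    simp only [pvAgo]
    split
    · exact Nat.le_succ f
    · split
      · split
        · split
          · exact le_trans (pvAgoList_fuel_le f _ _ _ _ _) (Nat.le_succ f)
          · exact Nat.le_succ f
        · exact Nat.le_succ f
      · exact Nat.le_succ f

theorem pvAgoList_nodup (fuel : Nat) (members : List String) (svc_groups : List (String × List (String × List String))) (svc_lookup : List (String × String)) (v acc : PySem.Set String) (h : acc.Nodup) :
    (pvAgoList fuel members svc_groups svc_lookup v acc).1.Nodup := by
  induction members generalizing fuel v acc with
  | nil => simpa only [pvAgoList] using h
  | cons m rest ih =>
    simp only [pvAgoList]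
    exact ih _ _ _ (by rw [PySem.Set.union_eq_update]; exact PySem.Set.nodup_update acc _ h)

theorem pvAgo_nodup (fuel : Nat) (name : String) (svc_groups : List (String × List (String × List String))) (svc_lookup : List (String × String)) (v : PySem.Set String) :
    (pvAgo fuel name svc_groups svc_lookup v).1.Nodup := by
  match fuel with
  | 0 => simp [pvAgo, PySem.Set.empty]
  | f + 1 =>
    simp only [pvAgo]
    split
    · simp [PySem.Set.empty]
    · split
      · split
        · split
          · exact pvAgoList_nodup f _ _ _ _ _ (by simp [PySem.Set.empty])
          · simp
        · simp
      · simp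

theorem pvBloop_nil (fuel : Nat) (svc_groups : List (String × List (String × List String))) (svc_lookup : List (String × String)) (v result : PySem.Set String) :
    pvBloop fuel [] svc_groups svc_lookup v result = result := by
  match fuel with
  | 0 => rfl
  | _ + 1 => rfl

mutual
theorem pv_sim (fuel : Nat) (name : String) (stack : List String) (svc_groups : List (String × List (String × List String))) (svc_lookup : List (String × String)) (v res : PySem.Set String) :
    pvBloop fuel (name :: stack) svc_groups svc_lookup v res =
      (fun r => pvBloop r.2.2 stack svc_groups svc_lookup r.2.1 (PySem.Set.update res r.1))
        (pvAgo fuel name svc_groups svc_lookup v) := by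
  match fuel with
  | 0 => simp only [pvAgo]; rfl
  | f + 1 =>
    simp only [pvAgo, pvBloop]
    by_cases hv : PySem.Set.contains v (PySem.Str.lower (PySem.Str.strip name)) = true
    · simp only [if_pos hv]; rfl
    · simp only [if_neg hv]
      cases hl : (PySem.Dict.mk svc_lookup).get? (PySem.Str.lower (PySem.Str.strip name)) with
      | none => rfl
      | some rn =>
        dsimp only
        cases hg : (PySem.Dict.mk svc_groups).get? rn with
        | none => rfl
        | some g =>
          by_cases hne : g ≠ []
          · simp only [if_pos hne]
            exact pv_simList f _ stack svc_groups svc_lookup _ res PySem.Set.empty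
          · simp only [if_neg hne]; rfl
termination_by (fuel, 0)
decreasing_by
  all_goals rw [Prod.lex_iff]
  all_goals simp

theorem pv_simList (fuel : Nat) (members stack : List String) (svc_groups : List (String × List (String × List String))) (svc_lookup : List (String × String)) (v res acc : PySem.Set String) :
    pvBloop fuel (members ++ stack) svc_groups svc_lookup v (PySem.Set.update res acc) =
      (fun r => pvBloop r.2.2 stack svc_groups svc_lookup r.2.1 (PySem.Set.update res r.1))
        (pvAgoList fuel members svc_groups svc_lookup v acc) := by
  match members with
  | [] => simp only [pvAgoList, List.nil_append]
  | m :: rest =>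
    have hle : (pvAgo fuel m svc_groups svc_lookup v).2.2 ≤ fuel :=
      pvAgo_fuel_le fuel m svc_groups svc_lookup v
    have hmin : min (pvAgo fuel m svc_groups svc_lookup v).2.2 fuel =
        (pvAgo fuel m svc_groups svc_lookup v).2.2 := Nat.min_eq_left hle
    simp only [pvAgoList, hmin]
    rw [List.cons_append, pv_sim fuel m (rest ++ stack) svc_groups svc_lookup v (PySem.Set.update res acc)]
    dsimp only
    rw [← pv_update_assoc, ← PySem.Set.union_eq_update]
    exact pv_simList (pvAgo fuel m svc_groups svc_lookup v).2.2 rest stack svc_groups svc_lookup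
      (pvAgo fuel m svc_groups svc_lookup v).2.1 res (PySem.Set.union acc (pvAgo fuel m svc_groups svc_lookup v).1)
termination_by (fuel, members.length + 1)
decreasing_by
  all_goals rw [Prod.lex_iff]
  all_goals simp
  all_goals omega
end

-- ===== VERDICT (by name: the statement is the Claim_ definition above) =====
theorem get_all_service_members_spec : Claim_equal_get_all_service_members := by
  intro name svc_groups svc_lookup _visited _
  simp only [Spec_get_all_service_members, get_all_service_members, get_all_service_members_alt]
  rw [pv_sim]
  simp only [pvBloop_nil, PySem.Set.update_empty]
  rw [PySem.Set.ofList_eq_self_of_nodup _ (pvAgo_nodup _ _ _ _ _)]
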